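-- pv_equiv track=rewrite | github.com/rugbyprof/4553-Spatial-DS | Summer_15/graphvizExample.py | GenerateBinaryTreeEdges
-- ===== SOURCE A (Python) =====
-- def GenerateBinaryTreeEdges(count):
--     edges = []
--     for i in range(count):
--         left = ((i+1) * 2) - 1
--         right = ((i+1) * 2 + 1) - 1
--
--         if left < count:
--             edges.append((str(i),str(left)))
--         if right < count:
--             edges.append((str(i),str(right)))
--     return edges
-- ===== SOURCE B (Python) =====
-- def GenerateBinaryTreeEdges(count):
--     return [(str((j - 1) // 2), str(j)) for j in range(1, count)]
-- ===== Notes on version B (the rewrite author's own statement) =====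
-- stated objective: simpler
-- what changed: B iterates over each child node j in range(1, count) and computes its parent (j-1)//2, replacing A's parent loop with two conditional appends per iteration by a single unconditional comprehension.
import Mathlib
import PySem

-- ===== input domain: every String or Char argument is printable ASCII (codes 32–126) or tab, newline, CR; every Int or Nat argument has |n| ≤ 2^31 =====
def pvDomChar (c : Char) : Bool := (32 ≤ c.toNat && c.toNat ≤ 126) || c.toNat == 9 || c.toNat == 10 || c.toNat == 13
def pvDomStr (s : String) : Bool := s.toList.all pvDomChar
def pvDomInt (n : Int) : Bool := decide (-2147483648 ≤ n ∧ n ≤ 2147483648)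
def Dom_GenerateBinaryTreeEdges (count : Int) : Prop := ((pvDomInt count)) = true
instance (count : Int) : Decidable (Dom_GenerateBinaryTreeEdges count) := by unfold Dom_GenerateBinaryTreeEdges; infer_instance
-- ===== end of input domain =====

-- B replaces A's parent loop (two conditional appends per parent) by one map over the children; same cost, simpler.

-- ===== PORT A =====
def GenerateBinaryTreeEdges (count : Int) : List (String × String) :=
  (PySem.List.pyRange 0 count 1).foldl (fun edges i =>
    let left := ((i + 1) * 2) - 1
    let right := ((i + 1) * 2 + 1) - 1
    let edges := if left < count then edges ++ [(PySem.Int.toStr i, PySem.Int.toStr left)] else edges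
    if right < count then edges ++ [(PySem.Int.toStr i, PySem.Int.toStr right)] else edges) []

-- ===== PORT B =====
def GenerateBinaryTreeEdges_alt (count : Int) : List (String × String) :=
  (PySem.List.pyRange 1 count 1).map
    (fun j => (PySem.Int.toStr (PySem.Int.floordiv (j - 1) 2), PySem.Int.toStr j))

-- ===== PRECONDITION & SPEC =====
def Spec_GenerateBinaryTreeEdges (count : Int) (out : List (String × String)) : Prop := out = GenerateBinaryTreeEdges_alt count
instance (count : Int) (out : List (String × String)) : Decidable (Spec_GenerateBinaryTreeEdges count out) := by unfold Spec_GenerateBinaryTreeEdges; infer_instance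

-- ===== CLAIM (what is proved, stated in full; the proofs are below) =====
def Claim_equal_GenerateBinaryTreeEdges : Prop := ∀ (count : Int), Dom_GenerateBinaryTreeEdges count → Spec_GenerateBinaryTreeEdges count (GenerateBinaryTreeEdges count)

-- ===== LEMMAS AND PROOFS =====

-- loop invariant: from parent i on, A's fold emits exactly the children 2i+1 … count-1 in order
theorem pvLoop (c : Int) : ∀ (n : Nat) (i : Int), 0 ≤ i → (c - i).toNat = n →
    ∀ (acc : List (String × String)),
    (PySem.List.pyRange i c 1).foldl (fun edges i =>
      let left := ((i + 1) * 2) - 1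
      let right := ((i + 1) * 2 + 1) - 1
      let edges := if left < c then edges ++ [(PySem.Int.toStr i, PySem.Int.toStr left)] else edges
      if right < c then edges ++ [(PySem.Int.toStr i, PySem.Int.toStr right)] else edges) acc
    = acc ++ (PySem.List.pyRange (2 * i + 1) c 1).map
        (fun j => (PySem.Int.toStr (PySem.Int.floordiv (j - 1) 2), PySem.Int.toStr j)) := by
  intro n
  induction n with
  | zero =>
    intro i hi hn acc
    have hci : c ≤ i := by omega
    rw [PySem.List.pyRange_one_eq_nil hci, PySem.List.pyRange_one_eq_nil (by omega)]
    simp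
  | succ n ih =>
    intro i hi hn acc
    have hic : i < c := by omega
    rw [PySem.List.pyRange_one_cons hic, List.foldl_cons]
    rw [ih (i + 1) (by omega) (by omega)]
    have hL : ((i + 1) * 2) - 1 = 2 * i + 1 := by ring
    have hR : ((i + 1) * 2 + 1) - 1 = 2 * i + 2 := by ring
    have hpL : PySem.Int.floordiv (2 * i + 1 - 1) 2 = i := by
      rw [PySem.Int.floordiv_eq_ediv_of_pos (by norm_num)]; omega
    have hpR : PySem.Int.floordiv (2 * i + 2 - 1) 2 = i := by
      rw [PySem.Int.floordiv_eq_ediv_of_pos (by norm_num)]; omega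
    simp only [hL, hR]
    by_cases h1 : 2 * i + 1 < c
    · by_cases h2 : 2 * i + 2 < c
      · rw [PySem.List.pyRange_one_cons h1, PySem.List.pyRange_one_cons (show 2*i+1+1 < c by omega)]
        have : 2 * i + 1 + 1 + 1 = 2 * (i + 1) + 1 := by ring
        rw [this]
        simp [h1, h2]
        exact ⟨by congr 1; omega, by congr 1; omega⟩
      · rw [PySem.List.pyRange_one_cons h1, PySem.List.pyRange_one_eq_nil (show c ≤ 2*i+1+1 by omega),
            PySem.List.pyRange_one_eq_nil (show c ≤ 2*(i+1)+1 by omega)]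
        simp [h1, h2]
    · have h2 : ¬ 2 * i + 2 < c := by omega
      rw [PySem.List.pyRange_one_eq_nil (show c ≤ 2*i+1 by omega),
          PySem.List.pyRange_one_eq_nil (show c ≤ 2*(i+1)+1 by omega)]
      simp [h1, h2]

-- ===== VERDICT (by name: the statement is the Claim_ definition above) =====
theorem GenerateBinaryTreeEdges_spec : Claim_equal_GenerateBinaryTreeEdges := by
  intro count _
  unfold Spec_GenerateBinaryTreeEdges GenerateBinaryTreeEdges GenerateBinaryTreeEdges_alt
  rw [pvLoop count (count - 0).toNat 0 le_rfl rfl]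
  norm_num
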